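-- pv_equiv track=rewrite | github.com/ghostdev137/ford-pscm-re | tools/compare_fw.py | find_diff_regions
-- ===== SOURCE A (Python) =====
-- def find_diff_regions(a, b, min_gap=4):
--     """Find regions where a and b differ. Merge if gap <= min_gap."""
--     assert len(a) == len(b)
--     regions = []
--     in_diff = False
--     start = 0
--     for i in range(len(a)):
--         if a[i] != b[i]:
--             if not in_diff:
--                 start = i
--                 in_diff = True
--             end = i
--         elif in_diff:
--             # Check if gap to next diff is small enough to merge
--             # Look ahead
--             found_next = False
--             for j in range(i, min(i + min_gap + 1, len(a))):
--                 if a[j] != b[j]: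
--                     found_next = True
--                     break
--             if not found_next:
--                 regions.append((start, end + 1))
--                 in_diff = False
--     if in_diff:
--         regions.append((start, end + 1))
--     return regions
-- ===== SOURCE B (Python) =====
-- def find_diff_regions(a, b, min_gap=4):
--     """Collect diff indices, then merge a diff into the last region when the gap
--     to its end is zero (adjacent diff) or <= min_gap."""
--     assert len(a) == len(b)
--     diffs = [i for i in range(len(a)) if a[i] != b[i]]
--     regions = []
--     for i in diffs:
--         if regions:
--             s, t = regions[-1]
--             gap = i - t
--             if gap == 0 or gap <= min_gap:
--                 regions[-1] = (s, i + 1)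
--                 continue
--         regions.append((i, i + 1))
--     return regions
-- ===== Notes on version B (the rewrite author's own statement) =====
-- stated objective: alternative
-- what changed: B first collects the diff indices in one pass and then merges consecutive diffs by looking BACK at the last region's end (gap 0 or gap <= min_gap), instead of A's state machine with an O(min_gap) look-ahead scan at each non-diff position; asymptotically O(n) vs O(n*min_gap) but not measurably faster at the default gap.
import Mathlib
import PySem

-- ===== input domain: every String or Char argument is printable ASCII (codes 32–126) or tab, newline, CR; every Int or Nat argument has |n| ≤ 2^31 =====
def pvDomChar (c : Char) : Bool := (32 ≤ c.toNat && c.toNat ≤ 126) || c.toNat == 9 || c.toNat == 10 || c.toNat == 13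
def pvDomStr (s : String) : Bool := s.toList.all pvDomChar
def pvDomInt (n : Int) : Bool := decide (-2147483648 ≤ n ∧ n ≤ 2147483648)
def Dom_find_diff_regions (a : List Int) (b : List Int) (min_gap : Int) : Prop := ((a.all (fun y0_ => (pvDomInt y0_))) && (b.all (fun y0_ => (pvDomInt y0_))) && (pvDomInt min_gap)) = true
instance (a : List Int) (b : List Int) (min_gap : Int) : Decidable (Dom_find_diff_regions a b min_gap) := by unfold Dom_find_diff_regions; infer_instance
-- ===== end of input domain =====

-- B collects the diff indices and merges by looking back at the last region's end,
-- instead of A's state machine with a look-ahead scan (objective: alternative).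


-- ===== PORT A =====
-- the inner look-ahead loop 'for j in range(i, min(i+min_gap+1, len(a))): if a[j]!=b[j]: found_next=True; break'
def fdr_found_next (a b : List Int) (min_gap i : Int) : Bool :=
  (PySem.List.pyRange i (min (i + min_gap + 1) (a.length : Int)) 1).any
    (fun j => PySem.List.pyGetD a j 0 != PySem.List.pyGetD b j 0)

-- A's loop body; state = (regions, in_diff, start, end); indices produced by range(len(a))
-- are always in range, so a[i]/b[i] is exactly pyGetD _ i 0 here
def fdr_stepA (a b : List Int) (min_gap : Int)
    (st : List (Int × Int) × Bool × Int × Int) (i : Int) : List (Int × Int) × Bool × Int × Int :=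
  if PySem.List.pyGetD a i 0 != PySem.List.pyGetD b i 0 then
    if !st.2.1 then (st.1, true, i, i) else (st.1, true, st.2.2.1, i)
  else if st.2.1 then
    if !(fdr_found_next a b min_gap i) then (st.1 ++ [(st.2.2.1, st.2.2.2 + 1)], false, st.2.2.1, st.2.2.2)
    else st
  else st

def find_diff_regions (a : List Int) (b : List Int) (min_gap : Int) : List (Int × Int) :=
  let st := (PySem.List.pyRange 0 (a.length : Int) 1).foldl (fdr_stepA a b min_gap) ([], false, 0, 0)
  if st.2.1 then st.1 ++ [(st.2.2.1, st.2.2.2 + 1)] else st.1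

-- ===== PORT B =====
-- B's loop body over the diff indices: look back at the last region's end
def fdr_stepB (min_gap : Int) (regions : List (Int × Int)) (i : Int) : List (Int × Int) :=
  match regions.getLast? with
  | some (s, t) =>
    if i - t == 0 || i - t ≤ min_gap then regions.dropLast ++ [(s, i + 1)]
    else regions ++ [(i, i + 1)]
  | none => regions ++ [(i, i + 1)]

def find_diff_regions_alt (a : List Int) (b : List Int) (min_gap : Int) : List (Int × Int) :=
  ((PySem.List.pyRange 0 (a.length : Int) 1).filter
      (fun i => PySem.List.pyGetD a i 0 != PySem.List.pyGetD b i 0)).foldl (fdr_stepB min_gap) []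

-- ===== PRECONDITION & SPEC =====
-- A asserts len(a) == len(b); on unequal lengths it raises AssertionError, so those inputs are excluded.
def Pre_find_diff_regions (a : List Int) (b : List Int) (min_gap : Int) : Prop := a.length = b.length
instance (a : List Int) (b : List Int) (min_gap : Int) : Decidable (Pre_find_diff_regions a b min_gap) := by unfold Pre_find_diff_regions; infer_instance
def pvWitness_find_diff_regions : List Int × List Int × Int := ([1, 2, 3, 0, 5], [1, 0, 3, 0, 9], 4)

def Spec_find_diff_regions (a : List Int) (b : List Int) (min_gap : Int) (out : List (Int × Int)) : Prop := out = find_diff_regions_alt a b min_gap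
instance (a : List Int) (b : List Int) (min_gap : Int) (out : List (Int × Int)) : Decidable (Spec_find_diff_regions a b min_gap out) := by unfold Spec_find_diff_regions; infer_instance

-- ===== CLAIM (what is proved, stated in full; the proofs are below) =====
def Claim_equal_find_diff_regions : Prop := ∀ (a : List Int) (b : List Int) (min_gap : Int), Dom_find_diff_regions a b min_gap → Pre_find_diff_regions a b min_gap → Spec_find_diff_regions a b min_gap (find_diff_regions a b min_gap)

-- ===== LEMMAS AND PROOFS =====

-- "position j is a diff"
def fdr_d (a b : List Int) (j : Int) : Bool :=
  PySem.List.pyGetD a j 0 != PySem.List.pyGetD b j 0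

-- A's final step applied to a loop state
def fdr_post (st : List (Int × Int) × Bool × Int × Int) : List (Int × Int) :=
  if st.2.1 then st.1 ++ [(st.2.2.1, st.2.2.2 + 1)] else st.1

lemma fdr_found_next_iff (a b : List Int) (min_gap i : Int) :
    fdr_found_next a b min_gap i = true ↔
      ∃ j, i ≤ j ∧ j < min (i + min_gap + 1) (a.length : Int) ∧ fdr_d a b j = true := by
  simp [fdr_found_next, fdr_d, List.any_eq_true, PySem.List.mem_pyRange_one]
  constructor
  · rintro ⟨j, ⟨h1, h2⟩, h3⟩; exact ⟨j, h1, h2, h3⟩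
  · rintro ⟨j, h1, h2, h3⟩; exact ⟨j, ⟨h1, h2⟩, h3⟩

-- the open-state invariant: region (s, e] open, positions in (e, i) are all non-diff,
-- and if any non-diff position was already inspected, its look-ahead found a diff
def fdr_openInv (a b : List Int) (min_gap i s e : Int) : Prop :=
  e + 1 ≤ i ∧ (∀ j, e < j → j < i → fdr_d a b j = false) ∧
    (e + 1 < i → ∃ j, e + 1 ≤ j ∧ j < min (e + 1 + min_gap + 1) (a.length : Int) ∧ fdr_d a b j = true)

-- the closed-state invariant: any upcoming diff is strictly beyond last-end + min_gap
def fdr_closedInv (a b : List Int) (min_gap i : Int) (R : List (Int × Int)) : Prop :=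
  ∀ s t, R.getLast? = some (s, t) →
    t < i ∧ ∀ j, i ≤ j → j < (a.length : Int) → fdr_d a b j = true → t + min_gap < j

-- the simulation: A's remaining loop from a related state equals B's remaining loop
lemma fdr_sim (a b : List Int) (min_gap : Int) (k : Nat) :
    ∀ (i : Int) (R : List (Int × Int)) (ind : Bool) (s e : Int) (Rb : List (Int × Int)),
      i + k = (a.length : Int) → 0 ≤ i →
      (if ind then Rb = R ++ [(s, e + 1)] ∧ fdr_openInv a b min_gap i s e
       else Rb = R ∧ fdr_closedInv a b min_gap i Rb) →
      fdr_post ((PySem.List.pyRange i (a.length : Int) 1).foldl (fdr_stepA a b min_gap) (R, ind, s, e)) =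
        ((PySem.List.pyRange i (a.length : Int) 1).filter (fun j => fdr_d a b j)).foldl (fdr_stepB min_gap) Rb := by
  induction k with
  | zero =>
    intro i R ind s e Rb hik hi hrel
    have hn : (a.length : Int) ≤ i := by omega
    rw [PySem.List.pyRange_one_eq_nil hn]
    simp only [List.foldl_nil, List.filter_nil]
    cases ind with
    | true => rw [if_pos rfl] at hrel; simp [fdr_post, hrel.1]
    | false => rw [if_neg (by simp : ¬ (false = true))] at hrel; simp [fdr_post, hrel.1]
  | succ k ih =>
    intro i R ind s e Rb hik hi hrel
    have hin : i < (a.length : Int) := by omega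
    rw [PySem.List.pyRange_one_cons hin]
    simp only [List.foldl_cons, List.filter_cons]
    by_cases hd : fdr_d a b i = true
    · -- position i is a diff
      rw [if_pos hd]
      simp only [List.foldl_cons]
      have hd' : (PySem.List.pyGetD a i 0 != PySem.List.pyGetD b i 0) = true := hd
      cases ind with
      | true =>
        rw [if_pos rfl] at hrel
        obtain ⟨hRb, he1, hnd, hex⟩ := hrel
        have hA : fdr_stepA a b min_gap (R, true, s, e) i = (R, true, s, i) := by
          simp [fdr_stepA, hd']
        -- B merges: the gap is zero or at most min_gap
        have hgap : i = e + 1 ∨ i - (e + 1) ≤ min_gap := by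
          rcases eq_or_lt_of_le he1 with h | h
          · exact Or.inl h.symm
          · obtain ⟨j, hj1, hj2, hj3⟩ := hex h
            have hj2' : j < e + 1 + min_gap + 1 := (lt_min_iff.mp hj2).1
            have hji : ¬ j < i := fun hlt => by
              have := hnd j (by omega) hlt
              rw [this] at hj3; exact Bool.false_ne_true hj3
            right; omega
        have hB : fdr_stepB min_gap Rb i = R ++ [(s, i + 1)] := by
          rw [hRb]
          simp [fdr_stepB]
          intro h
          rcases hgap with hg | hg <;> omega
        rw [hA, hB]
        refine ih (i + 1) R true s i (R ++ [(s, i + 1)]) (by omega) (by omega) ?_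
        rw [if_pos rfl]
        exact ⟨rfl, le_refl _, fun j h1 h2 => absurd h2 (by omega),
          fun h => absurd h (lt_irrefl _)⟩
      | false =>
        rw [if_neg (by simp : ¬ (false = true))] at hrel
        obtain ⟨hRb, hcl⟩ := hrel
        have hA : fdr_stepA a b min_gap (R, false, s, e) i = (R, true, i, i) := by
          simp [fdr_stepA, hd']
        have hB : fdr_stepB min_gap Rb i = R ++ [(i, i + 1)] := by
          rw [hRb]
          cases hR : R.getLast? with
          | none => simp [fdr_stepB, hR]
          | some p =>
            obtain ⟨s', t'⟩ := p
            obtain ⟨ht1, ht2⟩ := hcl s' t' (by rw [hRb]; exact hR)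
            have hfar : t' + min_gap < i := ht2 i (le_refl i) hin hd
            simp [fdr_stepB, hR]
            intro h
            exact absurd h (by omega)
        rw [hA, hB]
        refine ih (i + 1) R true i i (R ++ [(i, i + 1)]) (by omega) (by omega) ?_
        rw [if_pos rfl]
        exact ⟨rfl, le_refl _, fun j h1 h2 => absurd h2 (by omega),
          fun h => absurd h (lt_irrefl _)⟩
    · -- position i is not a diff
      rw [if_neg hd]
      have hdf : fdr_d a b i = false := by simpa using hd
      have hd' : (PySem.List.pyGetD a i 0 != PySem.List.pyGetD b i 0) = false := hdf
      cases ind with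
      | false =>
        rw [if_neg (by simp : ¬ (false = true))] at hrel
        obtain ⟨hRb, hcl⟩ := hrel
        have hA : fdr_stepA a b min_gap (R, false, s, e) i = (R, false, s, e) := by
          simp [fdr_stepA, hd']
        rw [hA]
        refine ih (i + 1) R false s e Rb (by omega) (by omega) ?_
        rw [if_neg (by simp : ¬ (false = true))]
        refine ⟨hRb, fun s' t' hlast => ?_⟩
        obtain ⟨ht1, ht2⟩ := hcl s' t' hlast
        exact ⟨by omega, fun j hj1 hj2 hj3 => ht2 j (by omega) hj2 hj3⟩
      | true =>
        rw [if_pos rfl] at hrel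
        obtain ⟨hRb, he1, hnd, hex⟩ := hrel
        by_cases hfn : fdr_found_next a b min_gap i = true
        · have hA : fdr_stepA a b min_gap (R, true, s, e) i = (R, true, s, e) := by
            simp [fdr_stepA, hd', hfn]
          rw [hA]
          refine ih (i + 1) R true s e Rb (by omega) (by omega) ?_
          rw [if_pos rfl]
          refine ⟨hRb, by omega, ?_, ?_⟩
          · intro j h1 h2
            rcases lt_or_ge j i with h | h
            · exact hnd j h1 h
            · have hji : j = i := by omega
              rw [hji]; exact hdf
          · intro _
            rcases eq_or_lt_of_le he1 with h | h
            · obtain ⟨j, hj1, hj2, hj3⟩ := (fdr_found_next_iff a b min_gap i).mp hfn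
              exact ⟨j, by omega, by rw [h]; exact hj2, hj3⟩
            · exact hex h
        · have hA : fdr_stepA a b min_gap (R, true, s, e) i =
              (R ++ [(s, e + 1)], false, s, e) := by
            simp only [Bool.not_eq_true] at hfn
            simp [fdr_stepA, hd', hfn]
          rw [hA]
          refine ih (i + 1) (R ++ [(s, e + 1)]) false s e Rb (by omega) (by omega) ?_
          rw [if_neg (by simp : ¬ (false = true))]
          refine ⟨hRb, fun s' t' hlast => ?_⟩
          rw [hRb] at hlast
          rw [List.getLast?_concat] at hlast
          have hs : s' = s ∧ t' = e + 1 := by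
            have := Option.some.inj hlast
            exact ⟨(Prod.mk.inj this).1.symm, (Prod.mk.inj this).2.symm⟩
          obtain ⟨rfl, rfl⟩ := hs
          refine ⟨by omega, fun j hj1 hj2 hj3 => ?_⟩
          have h5 : ¬ j < i + min_gap + 1 := fun hlt =>
            hfn ((fdr_found_next_iff a b min_gap i).mpr ⟨j, by omega, lt_min_iff.mpr ⟨hlt, hj2⟩, hj3⟩)
          omega

theorem find_diff_regions_spec : Claim_equal_find_diff_regions := by
  intro a b min_gap _ _
  have h := fdr_sim a b min_gap a.length 0 [] false 0 0 [] (by simp) (le_refl 0)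
    (by simp [fdr_closedInv])
  simpa [Spec_find_diff_regions, find_diff_regions, find_diff_regions_alt, fdr_post, fdr_d] using h
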